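-- pv_equiv track=rewrite | github.com/psilospore/cp-control-hs | compiler/src/CorrErrModel.py | gt_obs_to_error
-- ===== SOURCE A (Python) =====
-- def gt_obs_to_error(sample):
--     res=[]
--     pe=0
--     for c in sample:
--         gt=int(c[0])
--         obs=int(c[1])
--         ce=gt-obs
--         res.append((pe,gt,obs,ce))
--         pe=ce
--     return res
-- ===== SOURCE B (Python) =====
-- def gt_obs_to_error(sample):
--     errs = [int(c[0]) - int(c[1]) for c in sample]
--     prev = [0] + errs[:-1]
--     return [(pe, int(c[0]), int(c[1]), ce) for c, pe, ce in zip(sample, prev, errs)]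
-- ===== Notes on version B (the rewrite author's own statement) =====
-- stated objective: alternative
-- what changed: B first computes the whole list of current errors, shifts it by one to get each row's previous error, and zips, instead of threading a running pe accumulator through a loop.
import Mathlib
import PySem

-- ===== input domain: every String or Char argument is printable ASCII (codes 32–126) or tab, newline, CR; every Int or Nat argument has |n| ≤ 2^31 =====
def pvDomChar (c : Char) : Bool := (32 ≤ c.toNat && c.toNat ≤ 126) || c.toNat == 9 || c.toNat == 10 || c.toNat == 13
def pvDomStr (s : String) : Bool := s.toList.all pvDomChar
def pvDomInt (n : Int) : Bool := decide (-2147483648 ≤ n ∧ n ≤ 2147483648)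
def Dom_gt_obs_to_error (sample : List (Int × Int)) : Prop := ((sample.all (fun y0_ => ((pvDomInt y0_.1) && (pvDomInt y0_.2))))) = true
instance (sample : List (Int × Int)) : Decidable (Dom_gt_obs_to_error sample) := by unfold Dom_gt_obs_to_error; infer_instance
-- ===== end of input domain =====

-- B builds the error table once and pairs each row with its shifted predecessor instead of threading a running accumulator (alternative decomposition, same cost).


-- ===== PORT A =====
-- loop with running previous-error accumulator pe, transcribed as structural recursion
def gtObsLoop (pe : Int) (sample : List (Int × Int)) : List (Int × Int × Int × Int) :=
  match sample with
  | [] => []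
  | c :: rest =>
    let gt := c.1
    let obs := c.2
    let ce := gt - obs
    (pe, gt, obs, ce) :: gtObsLoop ce rest

def gt_obs_to_error (sample : List (Int × Int)) : List (Int × Int × Int × Int) :=
  gtObsLoop 0 sample

-- ===== PORT B =====
-- B: build the error table, shift it by one (prev = 0 :: errs[:-1]), zip with the samples
def gt_obs_to_error_alt (sample : List (Int × Int)) : List (Int × Int × Int × Int) :=
  let errs := sample.map (fun c => c.1 - c.2)
  let prev := 0 :: errs.dropLast
  (sample.zip (prev.zip errs)).map (fun x => (x.2.1, x.1.1, x.1.2, x.2.2))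

-- ===== PRECONDITION & SPEC =====
def Spec_gt_obs_to_error (sample : List (Int × Int)) (out : List (Int × Int × Int × Int)) : Prop := out = gt_obs_to_error_alt sample
instance (sample : List (Int × Int)) (out : List (Int × Int × Int × Int)) : Decidable (Spec_gt_obs_to_error sample out) := by unfold Spec_gt_obs_to_error; infer_instance

-- ===== CLAIM (what is proved, stated in full; the proofs are below) =====
def Claim_equal_gt_obs_to_error : Prop := ∀ (sample : List (Int × Int)), Dom_gt_obs_to_error sample → Spec_gt_obs_to_error sample (gt_obs_to_error sample)

-- ===== LEMMAS AND PROOFS =====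

-- ===== VERDICT (by name: the statement is the Claim_ definition above) =====
theorem gtObsLoop_eq (sample : List (Int × Int)) : ∀ pe : Int,
    gtObsLoop pe sample =
      (sample.zip ((pe :: (sample.map (fun c => c.1 - c.2)).dropLast).zip
        (sample.map (fun c => c.1 - c.2)))).map (fun x => (x.2.1, x.1.1, x.1.2, x.2.2)) := by
  induction sample with
  | nil => intro pe; rfl
  | cons c rest ih =>
    intro pe
    cases rest with
    | nil => simp [gtObsLoop]
    | cons r rs =>
      rw [show gtObsLoop pe (c :: r :: rs) =
            (pe, c.1, c.2, c.1 - c.2) :: gtObsLoop (c.1 - c.2) (r :: rs) from rfl,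
          ih (c.1 - c.2)]
      simp

theorem gt_obs_to_error_spec : Claim_equal_gt_obs_to_error := by
  intro sample _
  unfold Spec_gt_obs_to_error gt_obs_to_error gt_obs_to_error_alt
  simpa using gtObsLoop_eq sample 0
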